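-- pv_equiv track=rewrite | github.com/KGrafton86/LabradorCoatColors | python prototype with logic/recombine_genotypes.py | recombine_genotype
-- ===== SOURCE A (Python) =====
-- from itertools import product
--
-- def split_genes(genotype):
-- 	genotype = (genotype[0:2], genotype[2:4], genotype[4:6])
-- 	return (genotype)
--
-- def recombine_gene(sire, dam):
-- 	genes = list(product(sire, dam))
-- 	genelist = []
-- 	for i in genes:
-- 		genelist.append(''.join(sorted(i)))
-- 	return(genelist)
--
-- def recombine_genotype(sire, dam):
-- 	sire = split_genes(sire)
-- 	dam = split_genes(dam)
-- 	B = recombine_gene(sire[0], dam[0])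
-- 	E = recombine_gene(sire[1], dam[1])
-- 	D = recombine_gene(sire[2], dam[2])
-- 	genes = list(product(B, E, D))
-- 	genelist = []
-- 	for i in genes:
-- 		genelist.append(''.join(i))
-- 	return(sorted(genelist))
-- ===== SOURCE B (Python) =====
-- def _gene_table(sire, dam, lo, hi):
--     pairs = [min(s, d) + max(s, d) for s in sire[lo:hi] for d in dam[lo:hi]]
--     return [(k, pairs.count(k)) for k in sorted(set(pairs))]
--
-- def recombine_genotype(sire, dam):
--     gb = _gene_table(sire, dam, 0, 2)
--     ge = _gene_table(sire, dam, 2, 4)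
--     gd = _gene_table(sire, dam, 4, 6)
--     out = []
--     for b, nb in gb:
--         for e, ne in ge:
--             for d, nd in gd:
--                 out.extend([b + e + d] * (nb * ne * nd))
--     return out
-- ===== Notes on version B (the rewrite author's own statement) =====
-- stated objective: alternative
-- what changed: Instead of enumerating all 64 offspring genotypes with itertools.product and sorting that list, B builds for each gene a table of the DISTINCT sorted allele pairs (sorted(set)) with their multiplicities (count), then emits the product of the three tables in sorted key order, extending the output by [genotype]*(product of the three counts); no sort of the product list is ever performed.
import Mathlib
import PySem

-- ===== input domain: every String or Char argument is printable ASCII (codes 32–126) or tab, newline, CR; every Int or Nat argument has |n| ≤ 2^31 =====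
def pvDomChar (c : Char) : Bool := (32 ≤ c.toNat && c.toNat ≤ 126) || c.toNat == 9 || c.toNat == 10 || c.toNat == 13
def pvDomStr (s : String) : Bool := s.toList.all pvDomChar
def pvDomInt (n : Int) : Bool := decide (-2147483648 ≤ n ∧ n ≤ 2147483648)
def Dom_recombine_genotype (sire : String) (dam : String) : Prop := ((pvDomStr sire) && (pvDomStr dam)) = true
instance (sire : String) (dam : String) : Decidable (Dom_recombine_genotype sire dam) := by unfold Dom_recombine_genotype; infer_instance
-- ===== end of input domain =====

-- B replaces A's enumerate-all-64-then-sort pipeline by per-gene tables of DISTINCT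
-- sorted allele pairs with multiplicities (sorted(set)+count), emitted in key order
-- with replication — no sort of the product list (objective: alternative).


-- ===== PORT A =====
def split_genes (genotype : String) : String × String × String :=
  (PySem.Str.slice genotype (some 0) (some 2),
   PySem.Str.slice genotype (some 2) (some 4),
   PySem.Str.slice genotype (some 4) (some 6))

-- ''.join(sorted(i)) on a pair of 1-char strings is exactly the sorted two chars
-- rebuilt into a string (Python compares 1-char strings by code point, as Char '<' does).
def recombine_gene (sire : String) (dam : String) : List String :=
  let genes := sire.toList.flatMap (fun s => dam.toList.map (fun d => (s, d)))
  genes.foldl (fun genelist i =>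
    genelist ++ [String.ofList (PySem.List.sorted [i.1, i.2] (fun x => x) false)]) []

def recombine_genotype (sire : String) (dam : String) : List String :=
  let s := split_genes sire
  let d := split_genes dam
  let B := recombine_gene s.1 d.1
  let E := recombine_gene s.2.1 d.2.1
  let Dg := recombine_gene s.2.2 d.2.2
  let genes := B.flatMap (fun b => E.flatMap (fun e => Dg.map (fun g => (b, e, g))))
  let genelist := genes.foldl (fun acc i => acc ++ [(i.1 ++ i.2.1) ++ i.2.2]) []
  PySem.List.sorted genelist (fun x => x) false

-- ===== PORT B =====
-- min(s,d)+max(s,d) on 1-char Python strings is the two chars in code-point order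
-- (Char's order = Python's 1-char string order); sorted(set(..)) is
-- PySem.List.sorted (PySem.Set.ofList ..), pairs.count is PySem.List.count.
def gene_table (sire : String) (dam : String) (lo : Int) (hi : Int) : List (String × Nat) :=
  let pairs := (PySem.Str.slice sire (some lo) (some hi)).toList.flatMap (fun s =>
    (PySem.Str.slice dam (some lo) (some hi)).toList.map (fun d =>
      String.ofList [min s d, max s d]))
  (PySem.List.sorted (PySem.Set.ofList pairs) (fun x => x) false).map
    (fun k => (k, PySem.List.count pairs k))

-- out.extend([b+e+d] * (nb*ne*nd)) is appending List.replicate (counts are Nat, ≥ 0)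
def recombine_genotype_alt (sire : String) (dam : String) : List String :=
  let gb := gene_table sire dam 0 2
  let ge := gene_table sire dam 2 4
  let gd := gene_table sire dam 4 6
  gb.foldl (fun out p =>
    ge.foldl (fun out q =>
      gd.foldl (fun out r =>
        out ++ List.replicate (p.2 * q.2 * r.2) ((p.1 ++ q.1) ++ r.1)) out) out) []

-- ===== PRECONDITION & SPEC =====
def Spec_recombine_genotype (sire : String) (dam : String) (out : List String) : Prop := out = recombine_genotype_alt sire dam
instance (sire : String) (dam : String) (out : List String) : Decidable (Spec_recombine_genotype sire dam out) := by unfold Spec_recombine_genotype; infer_instance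

-- ===== CLAIM (what is proved, stated in full; the proofs are below) =====
def Claim_equal_recombine_genotype : Prop := ∀ (sire : String) (dam : String), Dom_recombine_genotype sire dam → Spec_recombine_genotype sire dam (recombine_genotype sire dam)

-- ===== LEMMAS AND PROOFS =====

-- the raw per-gene pair list both sides build (A in order, B behind its table)
def pairsOf (sire : String) (dam : String) (lo : Int) (hi : Int) : List String :=
  (PySem.Str.slice sire (some lo) (some hi)).toList.flatMap (fun s =>
    (PySem.Str.slice dam (some lo) (some hi)).toList.map (fun d =>
      String.ofList [min s d, max s d]))

def tableOf (L : List String) : List (String × Nat) :=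
  (PySem.List.sorted (PySem.Set.ofList L) (fun x => x) false).map
    (fun k => (k, PySem.List.count L k))

theorem gene_table_eq (sire dam : String) (lo hi : Int) :
    gene_table sire dam lo hi = tableOf (pairsOf sire dam lo hi) := rfl

-- A's per-pair sorted join equals B's min/max two-char string.
theorem rg_pair_eq (s d : Char) :
    String.ofList (PySem.List.sorted [s, d] (fun x => x) false) =
      String.ofList [min s d, max s d] := by
  by_cases h : s ≤ d
  · simp [PySem.List.sorted_eq_foldl_insertBy, PySem.List.insertBy, not_lt.mpr h,
      min_eq_left h, max_eq_right h]
  · simp [PySem.List.sorted_eq_foldl_insertBy, PySem.List.insertBy, not_le.mp h,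
      min_eq_right (not_le.mp h).le, max_eq_left (not_le.mp h).le]

-- A's recombine_gene on a gene slice is the raw pair list for that slice.
theorem rg_gene_eq (sire dam : String) (a b : Int) :
    recombine_gene (PySem.Str.slice sire (some a) (some b))
        (PySem.Str.slice dam (some a) (some b)) = pairsOf sire dam a b := by
  simp only [recombine_gene, pairsOf, PySem.List.foldl_append_singleton_eq_map,
    List.map_flatMap, List.map_map, Function.comp_def]
  simp [rg_pair_eq]

-- every pair string carries exactly two characters
theorem len_mem_pairsOf (sire dam : String) (lo hi : Int) :
    ∀ k ∈ pairsOf sire dam lo hi, k.toList.length = 2 := by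
  intro k hk
  simp only [pairsOf, List.mem_flatMap, List.mem_map] at hk
  obtain ⟨s, -, d, -, rfl⟩ := hk
  simp

theorem len_mem_tableOf (L : List String) (h2 : ∀ k ∈ L, k.toList.length = 2) :
    ∀ p ∈ tableOf L, p.1.toList.length = 2 := by
  intro p hp
  simp only [tableOf, List.mem_map] at hp
  obtain ⟨k, hk, rfl⟩ := hp
  exact h2 k ((PySem.Set.mem_ofList L k).mp ((PySem.List.mem_sorted _ _ _ _).mp hk))

-- ---- string lexicographic facts for fixed-width prefixes ----

theorem str_assoc (s t u : String) : (s ++ t) ++ u = s ++ (t ++ u) := by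
  apply String.toList_inj.mp; simp

theorem lex_lt_append : ∀ (u v x y : List Char), u.length = v.length → u < v → u ++ x < v ++ y := by
  intro u
  induction u with
  | nil =>
    intro v x y hlen h
    match v with
    | [] => cases (List.lt_iff_lex_lt _ _).mp h
    | c :: v => simp at hlen
  | cons a u ih =>
    intro v x y hlen h
    match v with
    | [] => simp at hlen
    | c :: v =>
      refine (List.lt_iff_lex_lt _ _).mpr ?_
      cases (List.lt_iff_lex_lt _ _).mp h with
      | rel hr => exact List.Lex.rel hr
      | cons ht =>
        exact List.Lex.cons ((List.lt_iff_lex_lt _ _).mp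
          (ih v x y (by simpa using hlen) ((List.lt_iff_lex_lt _ _).mpr ht)))

theorem lex_lt_append_right : ∀ (u x y : List Char), x < y → u ++ x < u ++ y := by
  intro u x y h
  induction u with
  | nil => exact h
  | cons a u ih =>
    rw [List.cons_append, List.cons_append]
    exact (List.lt_iff_lex_lt _ _).mpr (List.Lex.cons ((List.lt_iff_lex_lt _ _).mp ih))

theorem str_lt_append (u v x y : String) (hlen : u.toList.length = v.toList.length)
    (h : u < v) : u ++ x < v ++ y := by
  rw [String.lt_iff_toList_lt] at h ⊢
  rw [String.toList_append, String.toList_append]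
  exact lex_lt_append _ _ _ _ hlen h

theorem str_le_append_right (u x y : String) (h : x ≤ y) : u ++ x ≤ u ++ y := by
  rcases lt_or_eq_of_le h with hlt | rfl
  · apply le_of_lt
    rw [String.lt_iff_toList_lt] at hlt ⊢
    rw [String.toList_append, String.toList_append]
    exact lex_lt_append_right _ _ _ hlt
  · exact le_rfl

-- ---- counting lemmas for the permutation half ----

theorem sum_ite_nodup (g : String → Nat) :
    ∀ (K : List String) (x : String), K.Nodup → x ∈ K →
      (K.map (fun k => if x = k then g k else 0)).sum = g x := by
  intro K
  induction K with
  | nil => intro x _ hx; cases hx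
  | cons k K ih =>
    intro x hnd hx
    rcases List.mem_cons.mp hx with rfl | hx'
    · have hzero : (K.map (fun k' => if x = k' then g k' else 0)).sum = 0 := by
        apply List.sum_eq_zero; intro y hy
        simp only [List.mem_map] at hy; obtain ⟨k', hk', rfl⟩ := hy
        have hne : x ≠ k' := fun h => (List.nodup_cons.mp hnd).1 (h ▸ hk')
        simp [hne]
      simp [hzero]
    · have hne : x ≠ k := by rintro rfl; exact (List.nodup_cons.mp hnd).1 hx'
      simp [if_neg hne, ih x (List.nodup_cons.mp hnd).2 hx']

theorem sum_count_mul_aux (g : String → Nat) :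
    ∀ (P K : List String), K.Nodup → (∀ x ∈ P, x ∈ K) →
      (K.map (fun k => (List.count k P) * g k)).sum = (P.map g).sum := by
  intro P
  induction P with
  | nil => intro K _ _; simp
  | cons x P ih =>
    intro K hnd hmem
    have hx : x ∈ K := hmem x List.mem_cons_self
    have hsub : ∀ y ∈ P, y ∈ K := fun y hy => hmem y (List.mem_cons_of_mem _ hy)
    calc (K.map (fun k => (List.count k (x :: P)) * g k)).sum
        = (K.map (fun k => (List.count k P) * g k + (if x = k then g k else 0))).sum := by
          apply congrArg; apply List.map_congr_left; intro k _
          rw [List.count_cons, Nat.add_mul]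
          congr 1
          by_cases h : x = k <;> simp [h]
      _ = (K.map (fun k => (List.count k P) * g k)).sum
            + (K.map (fun k => if x = k then g k else 0)).sum := List.sum_map_add
      _ = (P.map g).sum + g x := by rw [ih K hnd hsub, sum_ite_nodup g K x hnd hx]
      _ = ((x :: P).map g).sum := by simp [Nat.add_comm]

-- distinct keys with multiplicities reproduce any sum over the raw list
theorem sum_count_mul (P : List String) (g : String → Nat) :
    ((tableOf P).map (fun p => p.2 * g p.1)).sum = (P.map g).sum := by
  have hperm := PySem.List.sorted_perm (PySem.Set.ofList P) (fun x : String => x) false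
  have hstep : ((tableOf P).map (fun p => p.2 * g p.1)).sum
      = ((PySem.Set.ofList P).map (fun k => (List.count k P) * g k)).sum := by
    unfold tableOf
    rw [List.map_map]
    have := (hperm.map (fun k => (List.count k P) * g k)).sum_eq
    simpa [Function.comp_def, PySem.List.count_eq] using this
  rw [hstep]
  exact sum_count_mul_aux g P (PySem.Set.ofList P) (PySem.Set.nodup_ofList P)
    (fun x hx => (PySem.Set.mem_ofList P x).mpr hx)

theorem count_map_eq_sum {β : Type} (l : List β) (f : β → String) (a : String) :
    List.count a (l.map f) = (l.map (fun x => if f x = a then 1 else 0)).sum := by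
  induction l with
  | nil => simp
  | cons x l ih => simp [List.count_cons, ih, beq_iff_eq, Nat.add_comm]

-- ---- the central theorem, for arbitrary per-gene pair lists ----

theorem central_perm (L1 L2 L3 : List String) :
    ((tableOf L1).flatMap (fun p => (tableOf L2).flatMap (fun q => (tableOf L3).flatMap
        (fun r => List.replicate (p.2 * q.2 * r.2) ((p.1 ++ q.1) ++ r.1))))).Perm
      (L1.flatMap (fun b => L2.flatMap (fun e => L3.map (fun d => (b ++ e) ++ d)))) := by
  rw [List.perm_iff_count]
  intro a
  simp only [List.count_flatMap, Function.comp_def, List.count_replicate, beq_iff_eq,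
    count_map_eq_sum]
  have h3 : ∀ s : String,
      ((tableOf L3).map (fun r => if s ++ r.1 = a then r.2 else 0)).sum
        = (L3.map (fun d => if s ++ d = a then 1 else 0)).sum := by
    intro s
    have h := sum_count_mul L3 (fun d => if s ++ d = a then 1 else 0)
    calc ((tableOf L3).map (fun r => if s ++ r.1 = a then r.2 else 0)).sum
        = ((tableOf L3).map (fun r => r.2 * (if s ++ r.1 = a then 1 else 0))).sum := by
          apply congrArg; apply List.map_congr_left; intro r _
          by_cases hc : s ++ r.1 = a <;> simp [hc]
      _ = _ := h
  have h2 : ∀ s : String,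
      ((tableOf L2).map (fun q => ((tableOf L3).map
          (fun r => if (s ++ q.1) ++ r.1 = a then q.2 * r.2 else 0)).sum)).sum
        = (L2.map (fun e => (L3.map (fun d => if (s ++ e) ++ d = a then 1 else 0)).sum)).sum := by
    intro s
    have h := sum_count_mul L2 (fun e => ((tableOf L3).map
      (fun r => if (s ++ e) ++ r.1 = a then r.2 else 0)).sum)
    calc ((tableOf L2).map (fun q => ((tableOf L3).map
            (fun r => if (s ++ q.1) ++ r.1 = a then q.2 * r.2 else 0)).sum)).sum
        = ((tableOf L2).map (fun q => q.2 * ((tableOf L3).map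
            (fun r => if (s ++ q.1) ++ r.1 = a then r.2 else 0)).sum)).sum := by
          apply congrArg; apply List.map_congr_left; intro q _
          rw [← List.sum_map_mul_left]
          apply congrArg; apply List.map_congr_left; intro r _
          by_cases hc : (s ++ q.1) ++ r.1 = a <;> simp [hc]
      _ = (L2.map (fun e => ((tableOf L3).map
            (fun r => if (s ++ e) ++ r.1 = a then r.2 else 0)).sum)).sum := h
      _ = _ := by
          apply congrArg; apply List.map_congr_left; intro e _; exact h3 (s ++ e)
  have h1 := sum_count_mul L1 (fun b => ((tableOf L2).map (fun q => ((tableOf L3).map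
    (fun r => if (b ++ q.1) ++ r.1 = a then q.2 * r.2 else 0)).sum)).sum)
  calc ((tableOf L1).map (fun p => ((tableOf L2).map (fun q => ((tableOf L3).map
          (fun r => if (p.1 ++ q.1) ++ r.1 = a then p.2 * q.2 * r.2 else 0)).sum)).sum)).sum
      = ((tableOf L1).map (fun p => p.2 * ((tableOf L2).map (fun q => ((tableOf L3).map
          (fun r => if (p.1 ++ q.1) ++ r.1 = a then q.2 * r.2 else 0)).sum)).sum)).sum := by
        apply congrArg; apply List.map_congr_left; intro p _
        rw [← List.sum_map_mul_left]
        apply congrArg; apply List.map_congr_left; intro q _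
        rw [← List.sum_map_mul_left]
        apply congrArg; apply List.map_congr_left; intro r _
        by_cases hc : (p.1 ++ q.1) ++ r.1 = a <;> simp [hc, Nat.mul_assoc]
    _ = (L1.map (fun b => ((tableOf L2).map (fun q => ((tableOf L3).map
          (fun r => if (b ++ q.1) ++ r.1 = a then q.2 * r.2 else 0)).sum)).sum)).sum := h1
    _ = _ := by
        apply congrArg; apply List.map_congr_left; intro b _; exact h2 b

-- ---- the sortedness half ----

theorem table_key_pairwise (L : List String) :
    (tableOf L).Pairwise (fun p q => p.1 < q.1) := by
  unfold tableOf
  rw [List.pairwise_map]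
  exact PySem.List.sorted_ofList_pairwise_lt L

theorem mem_flat2 {t2 t3 : List (String × Nat)} {n : (String × Nat) → (String × Nat) → Nat}
    {b : String} {x : String}
    (hx : x ∈ t2.flatMap (fun q => t3.flatMap (fun r => List.replicate (n q r) ((b ++ q.1) ++ r.1)))) :
    ∃ q ∈ t2, ∃ r ∈ t3, x = (b ++ q.1) ++ r.1 := by
  simp only [List.mem_flatMap, List.mem_replicate] at hx
  obtain ⟨q, hq, r, hr, -, rfl⟩ := hx
  exact ⟨q, hq, r, hr, rfl⟩

theorem central_pairwise (L1 L2 L3 : List String)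
    (h1 : ∀ k ∈ L1, k.toList.length = 2) (h2 : ∀ k ∈ L2, k.toList.length = 2) :
    ((tableOf L1).flatMap (fun p => (tableOf L2).flatMap (fun q => (tableOf L3).flatMap
        (fun r => List.replicate (p.2 * q.2 * r.2) ((p.1 ++ q.1) ++ r.1))))).Pairwise (· ≤ ·) := by
  rw [List.pairwise_flatMap]
  constructor
  · intro p _
    rw [List.pairwise_flatMap]
    constructor
    · intro q _
      rw [List.pairwise_flatMap]
      constructor
      · intro r _
        exact List.pairwise_replicate.mpr (Or.inr le_rfl)
      · apply (table_key_pairwise L3).imp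
        intro r r' hrr x hx y hy
        rw [List.eq_of_mem_replicate hx, List.eq_of_mem_replicate hy]
        exact str_le_append_right _ _ _ (le_of_lt hrr)
    · apply List.Pairwise.imp_of_mem ?_ (table_key_pairwise L2)
      intro q q' hq hq' hqq x hx y hy
      simp only [List.mem_flatMap, List.mem_replicate] at hx hy
      obtain ⟨r, hr, -, rfl⟩ := hx
      obtain ⟨r', hr', -, rfl⟩ := hy
      rw [str_assoc, str_assoc]
      apply str_le_append_right
      apply le_of_lt
      apply str_lt_append _ _ _ _ ?_ hqq
      rw [len_mem_tableOf L2 h2 q hq, len_mem_tableOf L2 h2 q' hq']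
  · apply List.Pairwise.imp_of_mem ?_ (table_key_pairwise L1)
    intro p p' hp hp' hpp x hx y hy
    obtain ⟨q, hq, r, hr, rfl⟩ := mem_flat2 hx
    obtain ⟨q', hq', r', hr', rfl⟩ := mem_flat2 hy
    rw [str_assoc, str_assoc]
    apply le_of_lt
    apply str_lt_append _ _ _ _ ?_ hpp
    rw [len_mem_tableOf L1 h1 p hp, len_mem_tableOf L1 h1 p' hp']

theorem central (L1 L2 L3 : List String)
    (h1 : ∀ k ∈ L1, k.toList.length = 2) (h2 : ∀ k ∈ L2, k.toList.length = 2) :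
    PySem.List.sorted (L1.flatMap (fun b => L2.flatMap (fun e => L3.map (fun d => (b ++ e) ++ d))))
        (fun x => x) false
      = (tableOf L1).flatMap (fun p => (tableOf L2).flatMap (fun q => (tableOf L3).flatMap
          (fun r => List.replicate (p.2 * q.2 * r.2) ((p.1 ++ q.1) ++ r.1)))) :=
  PySem.List.sorted_id_eq_of_perm_of_pairwise _ _
    (central_perm L1 L2 L3) (central_pairwise L1 L2 L3 h1 h2)

-- ===== VERDICT (by name: the statement is the Claim_ definition above) =====
set_option maxHeartbeats 1000000 in
theorem recombine_genotype_spec : Claim_equal_recombine_genotype := by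
  intro sire dam _
  unfold Spec_recombine_genotype recombine_genotype recombine_genotype_alt split_genes
  simp only [rg_gene_eq, gene_table_eq, PySem.List.foldl_append_singleton_eq_map,
    PySem.List.foldl_append_eq_flatMap, List.map_flatMap, List.map_map,
    Function.comp_def, List.nil_append]
  exact central _ _ _ (len_mem_pairsOf sire dam 0 2) (len_mem_pairsOf sire dam 2 4)
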